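-- pv_equiv track=rewrite | github.com/flo2406/Euler_project | project69.py | totient_maximum
-- ===== SOURCE A (Python) =====
-- def is_prime(n):
--     if n < 2:
--         return False
--
--     i = 2
--     while i * i <= n:
--         if n % i == 0:
--             return False
--         if i == 2:
--             i += 1
--         else:
--             i += 2
--     return True
--
-- def totient_maximum(limit):
--     res = 2
--     i = 3
--     while True:
--         if is_prime(i):
--             res *= i
--             if res > limit:
--                 res = res // i
--                 break
--         i += 1
--     return res
-- ===== SOURCE B (Python) =====
-- def totient_maximum(limit):
--     # Sieve of Eratosthenes over [2, bound], doubling bound until the answer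
--     # is found: walk the sieved primes in order, multiplying into the running
--     # primorial, and return it as soon as the next prime would push it past
--     # the limit (2 is always included, matching the minimum result of 2).
--     bound = 4
--     while True:
--         comp = [False] * (bound + 1)
--         res = 1
--         for p in range(2, bound + 1):
--             if not comp[p]:
--                 if res > 1 and res * p > limit:
--                     return res
--                 res *= p
--                 for m in range(p * p, bound + 1, p):
--                     comp[m] = True
--         bound *= 2
-- ===== Notes on version B (the rewrite author's own statement) =====
-- stated objective: alternative
-- what changed: Replaces per-candidate sqrt-n trial division with a Sieve of Eratosthenes over [2, bound] whose bound doubles geometrically: each pass marks composites with a boolean array and walks the surviving primes in order, returning the running primorial once the next prime would exceed the limit.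
import Mathlib
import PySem

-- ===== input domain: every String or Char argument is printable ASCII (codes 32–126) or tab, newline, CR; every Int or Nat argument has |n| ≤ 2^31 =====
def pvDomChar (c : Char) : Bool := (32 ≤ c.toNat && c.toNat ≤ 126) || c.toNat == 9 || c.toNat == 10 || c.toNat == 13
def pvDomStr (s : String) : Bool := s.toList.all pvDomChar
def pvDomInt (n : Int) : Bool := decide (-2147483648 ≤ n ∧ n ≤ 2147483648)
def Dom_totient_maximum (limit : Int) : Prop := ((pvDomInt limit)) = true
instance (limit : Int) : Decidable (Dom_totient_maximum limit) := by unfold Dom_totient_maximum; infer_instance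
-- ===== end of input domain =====

-- B replaces A's per-candidate trial division with a Sieve of Eratosthenes over a geometrically
-- doubling bound, walking the sieved primes and multiplying until the limit is passed; objective: alternative.

-- ===== PORT A =====
-- while i * i <= n: … (fuel bounds the iteration count; i grows every step, so n+1 steps always suffice,
-- making the fuel guard a totality device only, never a behaviour change)
def pvIsPrimeLoop (n : Int) (i : Int) : Nat → Bool
  | 0 => true
  | fuel+1 =>
    if i * i ≤ n then
      if PySem.Int.mod n i = 0 then false
      else pvIsPrimeLoop n (if i = 2 then i + 1 else i + 2) fuel
    else true

def is_prime (n : Int) : Bool :=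
  if n < 2 then false else pvIsPrimeLoop n 2 (n.toNat + 1)

-- while True: … (fuel makes the loop total; 32 iterations always suffice for |limit| ≤ 2^31,
-- because the running product exceeds 2^31 before i reaches 31)
def pvALoop (limit : Int) (res : Int) (i : Int) : Nat → Int
  | 0 => res
  | fuel+1 =>
    if is_prime i then
      if res * i > limit then PySem.Int.floordiv (res * i) i
      else pvALoop limit (res * i) (i + 1) fuel
    else pvALoop limit res (i + 1) fuel

def totient_maximum (limit : Int) : Int := pvALoop limit 2 3 32

-- ===== PORT B =====
-- for m in range(p*p, bound+1, p): comp[m] = True   (m is always ≥ 4 here, so .toNat is exact;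
-- List.set is exact for the in-range nonnegative indices Python writes to)
def pvMark (comp : List Bool) (ms : List Int) : List Bool :=
  ms.foldl (fun c m => c.set m.toNat true) comp

-- for p in range(2, bound+1): … with early return → structural recursion over the candidate list;
-- comp[p] is always in range in Python, so the .getD false never fires
def pvSieveLoop (limit : Int) (bound : Int) : List Int → List Bool → Int → Option Int
  | [], _, _ => none
  | p :: rest, comp, res =>
    if (PySem.List.pyGet? comp p).getD false = false then
      if res > 1 ∧ res * p > limit then some res
      else pvSieveLoop limit bound rest (pvMark comp (PySem.List.pyRange (p * p) (bound + 1) p)) (res * p)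
    else pvSieveLoop limit bound rest comp res

-- while True: … with bound *= 2 (fuel is a totality device only: 4 doublings from bound = 4 reach
-- bound = 32, whose sieve already returns for every |limit| ≤ 2^31)
def pvOuter (limit : Int) (bound : Int) : Nat → Int
  | 0 => 0
  | fuel+1 =>
    match pvSieveLoop limit bound (PySem.List.pyRange 2 (bound + 1) 1) (List.replicate (bound + 1).toNat false) 1 with
    | some r => r
    | none => pvOuter limit (bound * 2) fuel

def totient_maximum_alt (limit : Int) : Int := pvOuter limit 4 4

-- ===== PRECONDITION & SPEC =====
def Spec_totient_maximum (limit : Int) (out : Int) : Prop := out = totient_maximum_alt limit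
instance (limit : Int) (out : Int) : Decidable (Spec_totient_maximum limit out) := by unfold Spec_totient_maximum; infer_instance

-- ===== CLAIM =====
def Claim_equal_totient_maximum : Prop := ∀ (limit : Int), Dom_totient_maximum limit → Spec_totient_maximum limit (totient_maximum limit)

-- ===== LEMMAS AND PROOFS =====

-- closed interval form both programs compute for limit ≤ 2^31 (largest primorial ≤ limit, minimum 2)
def pvS (limit : Int) : Int :=
  if limit < 6 then 2 else if limit < 30 then 6 else if limit < 210 then 30
  else if limit < 2310 then 210 else if limit < 30030 then 2310
  else if limit < 510510 then 30030 else if limit < 9699690 then 510510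
  else if limit < 223092870 then 9699690 else 223092870

-- one-step unfoldings of A's fuelled loop at each concrete fuel value, and primality facts
theorem pvAstep6 (limit res i : Int) : pvALoop limit res i 6 = (if is_prime i then (if res * i > limit then PySem.Int.floordiv (res * i) i else pvALoop limit (res * i) (i + 1) 5) else pvALoop limit res (i + 1) 5) := rfl
theorem pvAstep7 (limit res i : Int) : pvALoop limit res i 7 = (if is_prime i then (if res * i > limit then PySem.Int.floordiv (res * i) i else pvALoop limit (res * i) (i + 1) 6) else pvALoop limit res (i + 1) 6) := rfl
theorem pvAstep8 (limit res i : Int) : pvALoop limit res i 8 = (if is_prime i then (if res * i > limit then PySem.Int.floordiv (res * i) i else pvALoop limit (res * i) (i + 1) 7) else pvALoop limit res (i + 1) 7) := rfl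
theorem pvAstep9 (limit res i : Int) : pvALoop limit res i 9 = (if is_prime i then (if res * i > limit then PySem.Int.floordiv (res * i) i else pvALoop limit (res * i) (i + 1) 8) else pvALoop limit res (i + 1) 8) := rfl
theorem pvAstep10 (limit res i : Int) : pvALoop limit res i 10 = (if is_prime i then (if res * i > limit then PySem.Int.floordiv (res * i) i else pvALoop limit (res * i) (i + 1) 9) else pvALoop limit res (i + 1) 9) := rfl
theorem pvAstep11 (limit res i : Int) : pvALoop limit res i 11 = (if is_prime i then (if res * i > limit then PySem.Int.floordiv (res * i) i else pvALoop limit (res * i) (i + 1) 10) else pvALoop limit res (i + 1) 10) := rfl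
theorem pvAstep12 (limit res i : Int) : pvALoop limit res i 12 = (if is_prime i then (if res * i > limit then PySem.Int.floordiv (res * i) i else pvALoop limit (res * i) (i + 1) 11) else pvALoop limit res (i + 1) 11) := rfl
theorem pvAstep13 (limit res i : Int) : pvALoop limit res i 13 = (if is_prime i then (if res * i > limit then PySem.Int.floordiv (res * i) i else pvALoop limit (res * i) (i + 1) 12) else pvALoop limit res (i + 1) 12) := rfl
theorem pvAstep14 (limit res i : Int) : pvALoop limit res i 14 = (if is_prime i then (if res * i > limit then PySem.Int.floordiv (res * i) i else pvALoop limit (res * i) (i + 1) 13) else pvALoop limit res (i + 1) 13) := rfl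
theorem pvAstep15 (limit res i : Int) : pvALoop limit res i 15 = (if is_prime i then (if res * i > limit then PySem.Int.floordiv (res * i) i else pvALoop limit (res * i) (i + 1) 14) else pvALoop limit res (i + 1) 14) := rfl
theorem pvAstep16 (limit res i : Int) : pvALoop limit res i 16 = (if is_prime i then (if res * i > limit then PySem.Int.floordiv (res * i) i else pvALoop limit (res * i) (i + 1) 15) else pvALoop limit res (i + 1) 15) := rfl
theorem pvAstep17 (limit res i : Int) : pvALoop limit res i 17 = (if is_prime i then (if res * i > limit then PySem.Int.floordiv (res * i) i else pvALoop limit (res * i) (i + 1) 16) else pvALoop limit res (i + 1) 16) := rfl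
theorem pvAstep18 (limit res i : Int) : pvALoop limit res i 18 = (if is_prime i then (if res * i > limit then PySem.Int.floordiv (res * i) i else pvALoop limit (res * i) (i + 1) 17) else pvALoop limit res (i + 1) 17) := rfl
theorem pvAstep19 (limit res i : Int) : pvALoop limit res i 19 = (if is_prime i then (if res * i > limit then PySem.Int.floordiv (res * i) i else pvALoop limit (res * i) (i + 1) 18) else pvALoop limit res (i + 1) 18) := rfl
theorem pvAstep20 (limit res i : Int) : pvALoop limit res i 20 = (if is_prime i then (if res * i > limit then PySem.Int.floordiv (res * i) i else pvALoop limit (res * i) (i + 1) 19) else pvALoop limit res (i + 1) 19) := rfl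
theorem pvAstep21 (limit res i : Int) : pvALoop limit res i 21 = (if is_prime i then (if res * i > limit then PySem.Int.floordiv (res * i) i else pvALoop limit (res * i) (i + 1) 20) else pvALoop limit res (i + 1) 20) := rfl
theorem pvAstep22 (limit res i : Int) : pvALoop limit res i 22 = (if is_prime i then (if res * i > limit then PySem.Int.floordiv (res * i) i else pvALoop limit (res * i) (i + 1) 21) else pvALoop limit res (i + 1) 21) := rfl
theorem pvAstep23 (limit res i : Int) : pvALoop limit res i 23 = (if is_prime i then (if res * i > limit then PySem.Int.floordiv (res * i) i else pvALoop limit (res * i) (i + 1) 22) else pvALoop limit res (i + 1) 22) := rfl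
theorem pvAstep24 (limit res i : Int) : pvALoop limit res i 24 = (if is_prime i then (if res * i > limit then PySem.Int.floordiv (res * i) i else pvALoop limit (res * i) (i + 1) 23) else pvALoop limit res (i + 1) 23) := rfl
theorem pvAstep25 (limit res i : Int) : pvALoop limit res i 25 = (if is_prime i then (if res * i > limit then PySem.Int.floordiv (res * i) i else pvALoop limit (res * i) (i + 1) 24) else pvALoop limit res (i + 1) 24) := rfl
theorem pvAstep26 (limit res i : Int) : pvALoop limit res i 26 = (if is_prime i then (if res * i > limit then PySem.Int.floordiv (res * i) i else pvALoop limit (res * i) (i + 1) 25) else pvALoop limit res (i + 1) 25) := rfl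
theorem pvAstep27 (limit res i : Int) : pvALoop limit res i 27 = (if is_prime i then (if res * i > limit then PySem.Int.floordiv (res * i) i else pvALoop limit (res * i) (i + 1) 26) else pvALoop limit res (i + 1) 26) := rfl
theorem pvAstep28 (limit res i : Int) : pvALoop limit res i 28 = (if is_prime i then (if res * i > limit then PySem.Int.floordiv (res * i) i else pvALoop limit (res * i) (i + 1) 27) else pvALoop limit res (i + 1) 27) := rfl
theorem pvAstep29 (limit res i : Int) : pvALoop limit res i 29 = (if is_prime i then (if res * i > limit then PySem.Int.floordiv (res * i) i else pvALoop limit (res * i) (i + 1) 28) else pvALoop limit res (i + 1) 28) := rfl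
theorem pvAstep30 (limit res i : Int) : pvALoop limit res i 30 = (if is_prime i then (if res * i > limit then PySem.Int.floordiv (res * i) i else pvALoop limit (res * i) (i + 1) 29) else pvALoop limit res (i + 1) 29) := rfl
theorem pvAstep31 (limit res i : Int) : pvALoop limit res i 31 = (if is_prime i then (if res * i > limit then PySem.Int.floordiv (res * i) i else pvALoop limit (res * i) (i + 1) 30) else pvALoop limit res (i + 1) 30) := rfl
theorem pvAstep32 (limit res i : Int) : pvALoop limit res i 32 = (if is_prime i then (if res * i > limit then PySem.Int.floordiv (res * i) i else pvALoop limit (res * i) (i + 1) 31) else pvALoop limit res (i + 1) 31) := rfl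
theorem pvIP3 : is_prime 3 = true := by decide
theorem pvIP4 : is_prime 4 = false := by decide
theorem pvIP5 : is_prime 5 = true := by decide
theorem pvIP6 : is_prime 6 = false := by decide
theorem pvIP7 : is_prime 7 = true := by decide
theorem pvIP8 : is_prime 8 = false := by decide
theorem pvIP9 : is_prime 9 = false := by decide
theorem pvIP10 : is_prime 10 = false := by decide
theorem pvIP11 : is_prime 11 = true := by decide
theorem pvIP12 : is_prime 12 = false := by decide
theorem pvIP13 : is_prime 13 = true := by decide
theorem pvIP14 : is_prime 14 = false := by decide
theorem pvIP15 : is_prime 15 = false := by decide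
theorem pvIP16 : is_prime 16 = false := by decide
theorem pvIP17 : is_prime 17 = true := by decide
theorem pvIP18 : is_prime 18 = false := by decide
theorem pvIP19 : is_prime 19 = true := by decide
theorem pvIP20 : is_prime 20 = false := by decide
theorem pvIP21 : is_prime 21 = false := by decide
theorem pvIP22 : is_prime 22 = false := by decide
theorem pvIP23 : is_prime 23 = true := by decide
theorem pvIP24 : is_prime 24 = false := by decide
theorem pvIP25 : is_prime 25 = false := by decide
theorem pvIP26 : is_prime 26 = false := by decide
theorem pvIP27 : is_prime 27 = false := by decide
theorem pvIP28 : is_prime 28 = false := by decide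
theorem pvIP29 : is_prime 29 = true := by decide

theorem pvA_eq_S (limit : Int) (h : limit ≤ 2147483648) : totient_maximum limit = pvS limit := by
  unfold totient_maximum
  rw [pvAstep32]
  simp only [Int.reduceAdd, Int.reduceMul]
  rw [pvIP3, if_pos (by decide)]
  by_cases h3 : (6 : Int) > limit
  · rw [if_pos h3]
    have hf : PySem.Int.floordiv 6 3 = 2 := by decide
    rw [hf]
    simp only [pvS]; split_ifs <;> omega
  rw [if_neg h3]
  rw [pvAstep31]
  simp only [Int.reduceAdd, Int.reduceMul]
  rw [pvIP4, if_neg (by decide)]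
  rw [pvAstep30]
  simp only [Int.reduceAdd, Int.reduceMul]
  rw [pvIP5, if_pos (by decide)]
  by_cases h5 : (30 : Int) > limit
  · rw [if_pos h5]
    have hf : PySem.Int.floordiv 30 5 = 6 := by decide
    rw [hf]
    simp only [pvS]; split_ifs <;> omega
  rw [if_neg h5]
  rw [pvAstep29]
  simp only [Int.reduceAdd, Int.reduceMul]
  rw [pvIP6, if_neg (by decide)]
  rw [pvAstep28]
  simp only [Int.reduceAdd, Int.reduceMul]
  rw [pvIP7, if_pos (by decide)]
  by_cases h7 : (210 : Int) > limit
  · rw [if_pos h7]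
    have hf : PySem.Int.floordiv 210 7 = 30 := by decide
    rw [hf]
    simp only [pvS]; split_ifs <;> omega
  rw [if_neg h7]
  rw [pvAstep27]
  simp only [Int.reduceAdd, Int.reduceMul]
  rw [pvIP8, if_neg (by decide)]
  rw [pvAstep26]
  simp only [Int.reduceAdd, Int.reduceMul]
  rw [pvIP9, if_neg (by decide)]
  rw [pvAstep25]
  simp only [Int.reduceAdd, Int.reduceMul]
  rw [pvIP10, if_neg (by decide)]
  rw [pvAstep24]
  simp only [Int.reduceAdd, Int.reduceMul]
  rw [pvIP11, if_pos (by decide)]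
  by_cases h11 : (2310 : Int) > limit
  · rw [if_pos h11]
    have hf : PySem.Int.floordiv 2310 11 = 210 := by decide
    rw [hf]
    simp only [pvS]; split_ifs <;> omega
  rw [if_neg h11]
  rw [pvAstep23]
  simp only [Int.reduceAdd, Int.reduceMul]
  rw [pvIP12, if_neg (by decide)]
  rw [pvAstep22]
  simp only [Int.reduceAdd, Int.reduceMul]
  rw [pvIP13, if_pos (by decide)]
  by_cases h13 : (30030 : Int) > limit
  · rw [if_pos h13]
    have hf : PySem.Int.floordiv 30030 13 = 2310 := by decide
    rw [hf]
    simp only [pvS]; split_ifs <;> omega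
  rw [if_neg h13]
  rw [pvAstep21]
  simp only [Int.reduceAdd, Int.reduceMul]
  rw [pvIP14, if_neg (by decide)]
  rw [pvAstep20]
  simp only [Int.reduceAdd, Int.reduceMul]
  rw [pvIP15, if_neg (by decide)]
  rw [pvAstep19]
  simp only [Int.reduceAdd, Int.reduceMul]
  rw [pvIP16, if_neg (by decide)]
  rw [pvAstep18]
  simp only [Int.reduceAdd, Int.reduceMul]
  rw [pvIP17, if_pos (by decide)]
  by_cases h17 : (510510 : Int) > limit
  · rw [if_pos h17]
    have hf : PySem.Int.floordiv 510510 17 = 30030 := by decide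
    rw [hf]
    simp only [pvS]; split_ifs <;> omega
  rw [if_neg h17]
  rw [pvAstep17]
  simp only [Int.reduceAdd, Int.reduceMul]
  rw [pvIP18, if_neg (by decide)]
  rw [pvAstep16]
  simp only [Int.reduceAdd, Int.reduceMul]
  rw [pvIP19, if_pos (by decide)]
  by_cases h19 : (9699690 : Int) > limit
  · rw [if_pos h19]
    have hf : PySem.Int.floordiv 9699690 19 = 510510 := by decide
    rw [hf]
    simp only [pvS]; split_ifs <;> omega
  rw [if_neg h19]
  rw [pvAstep15]
  simp only [Int.reduceAdd, Int.reduceMul]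
  rw [pvIP20, if_neg (by decide)]
  rw [pvAstep14]
  simp only [Int.reduceAdd, Int.reduceMul]
  rw [pvIP21, if_neg (by decide)]
  rw [pvAstep13]
  simp only [Int.reduceAdd, Int.reduceMul]
  rw [pvIP22, if_neg (by decide)]
  rw [pvAstep12]
  simp only [Int.reduceAdd, Int.reduceMul]
  rw [pvIP23, if_pos (by decide)]
  by_cases h23 : (223092870 : Int) > limit
  · rw [if_pos h23]
    have hf : PySem.Int.floordiv 223092870 23 = 9699690 := by decide
    rw [hf]
    simp only [pvS]; split_ifs <;> omega
  rw [if_neg h23]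
  rw [pvAstep11]
  simp only [Int.reduceAdd, Int.reduceMul]
  rw [pvIP24, if_neg (by decide)]
  rw [pvAstep10]
  simp only [Int.reduceAdd, Int.reduceMul]
  rw [pvIP25, if_neg (by decide)]
  rw [pvAstep9]
  simp only [Int.reduceAdd, Int.reduceMul]
  rw [pvIP26, if_neg (by decide)]
  rw [pvAstep8]
  simp only [Int.reduceAdd, Int.reduceMul]
  rw [pvIP27, if_neg (by decide)]
  rw [pvAstep7]
  simp only [Int.reduceAdd, Int.reduceMul]
  rw [pvIP28, if_neg (by decide)]
  rw [pvAstep6]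
  simp only [Int.reduceAdd, Int.reduceMul]
  rw [pvIP29, if_pos (by decide)]
  rw [if_pos (by omega)]
  have hf : PySem.Int.floordiv 6469693230 29 = 223092870 := by decide
  rw [hf]
  simp only [pvS]; split_ifs <;> omega

-- one-step unfolding of B's sieve walk, and the outer loop's two exits
theorem pvStep (limit bound p : Int) (rest : List Int) (comp : List Bool) (res : Int) :
    pvSieveLoop limit bound (p :: rest) comp res =
      (if (PySem.List.pyGet? comp p).getD false = false then
        (if res > 1 ∧ res * p > limit then some res
         else pvSieveLoop limit bound rest (pvMark comp (PySem.List.pyRange (p * p) (bound + 1) p)) (res * p))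
       else pvSieveLoop limit bound rest comp res) := rfl

theorem pvOuterSome (limit bound r : Int) (fuel : Nat)
    (h : pvSieveLoop limit bound (PySem.List.pyRange 2 (bound + 1) 1) (List.replicate (bound + 1).toNat false) 1 = some r) :
    pvOuter limit bound (fuel + 1) = r := by
  unfold pvOuter; rw [h]

theorem pvOuterNone (limit bound : Int) (fuel : Nat)
    (h : pvSieveLoop limit bound (PySem.List.pyRange 2 (bound + 1) 1) (List.replicate (bound + 1).toNat false) 1 = none) :
    pvOuter limit bound (fuel + 1) = pvOuter limit (bound * 2) fuel := by
  conv_lhs => unfold pvOuter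
  rw [h]

theorem pvB_eq_S (limit : Int) (h : limit ≤ 2147483648) : totient_maximum_alt limit = pvS limit := by
  unfold totient_maximum_alt
  by_cases c0 : (6 : Int) > limit
  · -- limit < 6: the bound-4 sieve returns 2 at p = 3
    have hs0 : pvSieveLoop limit 4 ([2, 3, 4] : List Int) (List.replicate 5 false) 1 = some 2 := by
      rw [pvStep]
      rw [if_pos (by decide)]
      rw [if_neg (fun hh => absurd hh.1 (by norm_num))]
      simp only [Int.reduceMul]
      rw [pvStep]
      rw [if_pos (by decide)]
      rw [if_pos (by exact ⟨by norm_num, by omega⟩)]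
    have he : pvOuter limit 4 4 = 2 := pvOuterSome limit 4 2 3 hs0
    rw [he]; simp only [pvS]; split_ifs <;> omega
  have hn4_1 : pvSieveLoop limit 4 ([2, 3, 4] : List Int) (List.replicate 5 false) 1 = none := by
    rw [pvStep]
    rw [if_pos (by decide)]
    rw [if_neg (fun hh => absurd hh.1 (by norm_num))]
    simp only [Int.reduceMul]
    rw [pvStep]
    rw [if_pos (by decide)]
    rw [if_neg (by omega)]
    simp only [Int.reduceMul]
    rw [pvStep]
    rw [if_neg (by decide)]
    rfl
  have he4_1 : pvOuter limit 4 4 = pvOuter limit 8 3 := pvOuterNone limit 4 3 hn4_1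
  rw [he4_1]
  by_cases c1 : (30 : Int) > limit
  · -- limit < 30: the bound-8 sieve returns 6 at p = 5
    have hs1 : pvSieveLoop limit 8 ([2, 3, 4, 5, 6, 7, 8] : List Int) (List.replicate 9 false) 1 = some 6 := by
      rw [pvStep]
      rw [if_pos (by decide)]
      rw [if_neg (fun hh => absurd hh.1 (by norm_num))]
      simp only [Int.reduceMul]
      rw [pvStep]
      rw [if_pos (by decide)]
      rw [if_neg (by omega)]
      simp only [Int.reduceMul]
      rw [pvStep]
      rw [if_neg (by decide)]
      rw [pvStep]
      rw [if_pos (by decide)]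
      rw [if_pos (by exact ⟨by norm_num, by omega⟩)]
    have he : pvOuter limit 8 3 = 6 := pvOuterSome limit 8 6 2 hs1
    rw [he]; simp only [pvS]; split_ifs <;> omega
  by_cases c2 : (210 : Int) > limit
  · -- limit < 210: the bound-8 sieve returns 30 at p = 7
    have hs2 : pvSieveLoop limit 8 ([2, 3, 4, 5, 6, 7, 8] : List Int) (List.replicate 9 false) 1 = some 30 := by
      rw [pvStep]
      rw [if_pos (by decide)]
      rw [if_neg (fun hh => absurd hh.1 (by norm_num))]
      simp only [Int.reduceMul]
      rw [pvStep]
      rw [if_pos (by decide)]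
      rw [if_neg (by omega)]
      simp only [Int.reduceMul]
      rw [pvStep]
      rw [if_neg (by decide)]
      rw [pvStep]
      rw [if_pos (by decide)]
      rw [if_neg (by omega)]
      simp only [Int.reduceMul]
      rw [pvStep]
      rw [if_neg (by decide)]
      rw [pvStep]
      rw [if_pos (by decide)]
      rw [if_pos (by exact ⟨by norm_num, by omega⟩)]
    have he : pvOuter limit 8 3 = 30 := pvOuterSome limit 8 30 2 hs2
    rw [he]; simp only [pvS]; split_ifs <;> omega
  have hn8_3 : pvSieveLoop limit 8 ([2, 3, 4, 5, 6, 7, 8] : List Int) (List.replicate 9 false) 1 = none := by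
    rw [pvStep]
    rw [if_pos (by decide)]
    rw [if_neg (fun hh => absurd hh.1 (by norm_num))]
    simp only [Int.reduceMul]
    rw [pvStep]
    rw [if_pos (by decide)]
    rw [if_neg (by omega)]
    simp only [Int.reduceMul]
    rw [pvStep]
    rw [if_neg (by decide)]
    rw [pvStep]
    rw [if_pos (by decide)]
    rw [if_neg (by omega)]
    simp only [Int.reduceMul]
    rw [pvStep]
    rw [if_neg (by decide)]
    rw [pvStep]
    rw [if_pos (by decide)]
    rw [if_neg (by omega)]
    simp only [Int.reduceMul]
    rw [pvStep]
    rw [if_neg (by decide)]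
    rfl
  have he8_3 : pvOuter limit 8 3 = pvOuter limit 16 2 := pvOuterNone limit 8 2 hn8_3
  rw [he8_3]
  by_cases c3 : (2310 : Int) > limit
  · -- limit < 2310: the bound-16 sieve returns 210 at p = 11
    have hs3 : pvSieveLoop limit 16 ([2, 3, 4, 5, 6, 7, 8, 9, 10, 11, 12, 13, 14, 15, 16] : List Int) (List.replicate 17 false) 1 = some 210 := by
      rw [pvStep]
      rw [if_pos (by decide)]
      rw [if_neg (fun hh => absurd hh.1 (by norm_num))]
      simp only [Int.reduceMul]
      rw [pvStep]
      rw [if_pos (by decide)]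
      rw [if_neg (by omega)]
      simp only [Int.reduceMul]
      rw [pvStep]
      rw [if_neg (by decide)]
      rw [pvStep]
      rw [if_pos (by decide)]
      rw [if_neg (by omega)]
      simp only [Int.reduceMul]
      rw [pvStep]
      rw [if_neg (by decide)]
      rw [pvStep]
      rw [if_pos (by decide)]
      rw [if_neg (by omega)]
      simp only [Int.reduceMul]
      rw [pvStep]
      rw [if_neg (by decide)]
      rw [pvStep]
      rw [if_neg (by decide)]
      rw [pvStep]
      rw [if_neg (by decide)]
      rw [pvStep]
      rw [if_pos (by decide)]
      rw [if_pos (by exact ⟨by norm_num, by omega⟩)]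
    have he : pvOuter limit 16 2 = 210 := pvOuterSome limit 16 210 1 hs3
    rw [he]; simp only [pvS]; split_ifs <;> omega
  by_cases c4 : (30030 : Int) > limit
  · -- limit < 30030: the bound-16 sieve returns 2310 at p = 13
    have hs4 : pvSieveLoop limit 16 ([2, 3, 4, 5, 6, 7, 8, 9, 10, 11, 12, 13, 14, 15, 16] : List Int) (List.replicate 17 false) 1 = some 2310 := by
      rw [pvStep]
      rw [if_pos (by decide)]
      rw [if_neg (fun hh => absurd hh.1 (by norm_num))]
      simp only [Int.reduceMul]
      rw [pvStep]
      rw [if_pos (by decide)]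
      rw [if_neg (by omega)]
      simp only [Int.reduceMul]
      rw [pvStep]
      rw [if_neg (by decide)]
      rw [pvStep]
      rw [if_pos (by decide)]
      rw [if_neg (by omega)]
      simp only [Int.reduceMul]
      rw [pvStep]
      rw [if_neg (by decide)]
      rw [pvStep]
      rw [if_pos (by decide)]
      rw [if_neg (by omega)]
      simp only [Int.reduceMul]
      rw [pvStep]
      rw [if_neg (by decide)]
      rw [pvStep]
      rw [if_neg (by decide)]
      rw [pvStep]
      rw [if_neg (by decide)]
      rw [pvStep]
      rw [if_pos (by decide)]
      rw [if_neg (by omega)]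
      simp only [Int.reduceMul]
      rw [pvStep]
      rw [if_neg (by decide)]
      rw [pvStep]
      rw [if_pos (by decide)]
      rw [if_pos (by exact ⟨by norm_num, by omega⟩)]
    have he : pvOuter limit 16 2 = 2310 := pvOuterSome limit 16 2310 1 hs4
    rw [he]; simp only [pvS]; split_ifs <;> omega
  have hn16_5 : pvSieveLoop limit 16 ([2, 3, 4, 5, 6, 7, 8, 9, 10, 11, 12, 13, 14, 15, 16] : List Int) (List.replicate 17 false) 1 = none := by
    rw [pvStep]
    rw [if_pos (by decide)]
    rw [if_neg (fun hh => absurd hh.1 (by norm_num))]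
    simp only [Int.reduceMul]
    rw [pvStep]
    rw [if_pos (by decide)]
    rw [if_neg (by omega)]
    simp only [Int.reduceMul]
    rw [pvStep]
    rw [if_neg (by decide)]
    rw [pvStep]
    rw [if_pos (by decide)]
    rw [if_neg (by omega)]
    simp only [Int.reduceMul]
    rw [pvStep]
    rw [if_neg (by decide)]
    rw [pvStep]
    rw [if_pos (by decide)]
    rw [if_neg (by omega)]
    simp only [Int.reduceMul]
    rw [pvStep]
    rw [if_neg (by decide)]
    rw [pvStep]
    rw [if_neg (by decide)]
    rw [pvStep]
    rw [if_neg (by decide)]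
    rw [pvStep]
    rw [if_pos (by decide)]
    rw [if_neg (by omega)]
    simp only [Int.reduceMul]
    rw [pvStep]
    rw [if_neg (by decide)]
    rw [pvStep]
    rw [if_pos (by decide)]
    rw [if_neg (by omega)]
    simp only [Int.reduceMul]
    rw [pvStep]
    rw [if_neg (by decide)]
    rw [pvStep]
    rw [if_neg (by decide)]
    rw [pvStep]
    rw [if_neg (by decide)]
    rfl
  have he16_5 : pvOuter limit 16 2 = pvOuter limit 32 1 := pvOuterNone limit 16 1 hn16_5
  rw [he16_5]
  by_cases c5 : (510510 : Int) > limit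
  · -- limit < 510510: the bound-32 sieve returns 30030 at p = 17
    have hs5 : pvSieveLoop limit 32 ([2, 3, 4, 5, 6, 7, 8, 9, 10, 11, 12, 13, 14, 15, 16, 17, 18, 19, 20, 21, 22, 23, 24, 25, 26, 27, 28, 29, 30, 31, 32] : List Int) (List.replicate 33 false) 1 = some 30030 := by
      rw [pvStep]
      rw [if_pos (by decide)]
      rw [if_neg (fun hh => absurd hh.1 (by norm_num))]
      simp only [Int.reduceMul]
      rw [pvStep]
      rw [if_pos (by decide)]
      rw [if_neg (by omega)]
      simp only [Int.reduceMul]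
      rw [pvStep]
      rw [if_neg (by decide)]
      rw [pvStep]
      rw [if_pos (by decide)]
      rw [if_neg (by omega)]
      simp only [Int.reduceMul]
      rw [pvStep]
      rw [if_neg (by decide)]
      rw [pvStep]
      rw [if_pos (by decide)]
      rw [if_neg (by omega)]
      simp only [Int.reduceMul]
      rw [pvStep]
      rw [if_neg (by decide)]
      rw [pvStep]
      rw [if_neg (by decide)]
      rw [pvStep]
      rw [if_neg (by decide)]
      rw [pvStep]
      rw [if_pos (by decide)]
      rw [if_neg (by omega)]
      simp only [Int.reduceMul]
      rw [pvStep]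
      rw [if_neg (by decide)]
      rw [pvStep]
      rw [if_pos (by decide)]
      rw [if_neg (by omega)]
      simp only [Int.reduceMul]
      rw [pvStep]
      rw [if_neg (by decide)]
      rw [pvStep]
      rw [if_neg (by decide)]
      rw [pvStep]
      rw [if_neg (by decide)]
      rw [pvStep]
      rw [if_pos (by decide)]
      rw [if_pos (by exact ⟨by norm_num, by omega⟩)]
    have he : pvOuter limit 32 1 = 30030 := pvOuterSome limit 32 30030 0 hs5
    rw [he]; simp only [pvS]; split_ifs <;> omega
  by_cases c6 : (9699690 : Int) > limit
  · -- limit < 9699690: the bound-32 sieve returns 510510 at p = 19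
    have hs6 : pvSieveLoop limit 32 ([2, 3, 4, 5, 6, 7, 8, 9, 10, 11, 12, 13, 14, 15, 16, 17, 18, 19, 20, 21, 22, 23, 24, 25, 26, 27, 28, 29, 30, 31, 32] : List Int) (List.replicate 33 false) 1 = some 510510 := by
      rw [pvStep]
      rw [if_pos (by decide)]
      rw [if_neg (fun hh => absurd hh.1 (by norm_num))]
      simp only [Int.reduceMul]
      rw [pvStep]
      rw [if_pos (by decide)]
      rw [if_neg (by omega)]
      simp only [Int.reduceMul]
      rw [pvStep]
      rw [if_neg (by decide)]
      rw [pvStep]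
      rw [if_pos (by decide)]
      rw [if_neg (by omega)]
      simp only [Int.reduceMul]
      rw [pvStep]
      rw [if_neg (by decide)]
      rw [pvStep]
      rw [if_pos (by decide)]
      rw [if_neg (by omega)]
      simp only [Int.reduceMul]
      rw [pvStep]
      rw [if_neg (by decide)]
      rw [pvStep]
      rw [if_neg (by decide)]
      rw [pvStep]
      rw [if_neg (by decide)]
      rw [pvStep]
      rw [if_pos (by decide)]
      rw [if_neg (by omega)]
      simp only [Int.reduceMul]
      rw [pvStep]
      rw [if_neg (by decide)]
      rw [pvStep]
      rw [if_pos (by decide)]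
      rw [if_neg (by omega)]
      simp only [Int.reduceMul]
      rw [pvStep]
      rw [if_neg (by decide)]
      rw [pvStep]
      rw [if_neg (by decide)]
      rw [pvStep]
      rw [if_neg (by decide)]
      rw [pvStep]
      rw [if_pos (by decide)]
      rw [if_neg (by omega)]
      simp only [Int.reduceMul]
      rw [pvStep]
      rw [if_neg (by decide)]
      rw [pvStep]
      rw [if_pos (by decide)]
      rw [if_pos (by exact ⟨by norm_num, by omega⟩)]
    have he : pvOuter limit 32 1 = 510510 := pvOuterSome limit 32 510510 0 hs6
    rw [he]; simp only [pvS]; split_ifs <;> omega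
  by_cases c7 : (223092870 : Int) > limit
  · -- limit < 223092870: the bound-32 sieve returns 9699690 at p = 23
    have hs7 : pvSieveLoop limit 32 ([2, 3, 4, 5, 6, 7, 8, 9, 10, 11, 12, 13, 14, 15, 16, 17, 18, 19, 20, 21, 22, 23, 24, 25, 26, 27, 28, 29, 30, 31, 32] : List Int) (List.replicate 33 false) 1 = some 9699690 := by
      rw [pvStep]
      rw [if_pos (by decide)]
      rw [if_neg (fun hh => absurd hh.1 (by norm_num))]
      simp only [Int.reduceMul]
      rw [pvStep]
      rw [if_pos (by decide)]
      rw [if_neg (by omega)]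
      simp only [Int.reduceMul]
      rw [pvStep]
      rw [if_neg (by decide)]
      rw [pvStep]
      rw [if_pos (by decide)]
      rw [if_neg (by omega)]
      simp only [Int.reduceMul]
      rw [pvStep]
      rw [if_neg (by decide)]
      rw [pvStep]
      rw [if_pos (by decide)]
      rw [if_neg (by omega)]
      simp only [Int.reduceMul]
      rw [pvStep]
      rw [if_neg (by decide)]
      rw [pvStep]
      rw [if_neg (by decide)]
      rw [pvStep]
      rw [if_neg (by decide)]
      rw [pvStep]
      rw [if_pos (by decide)]
      rw [if_neg (by omega)]
      simp only [Int.reduceMul]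
      rw [pvStep]
      rw [if_neg (by decide)]
      rw [pvStep]
      rw [if_pos (by decide)]
      rw [if_neg (by omega)]
      simp only [Int.reduceMul]
      rw [pvStep]
      rw [if_neg (by decide)]
      rw [pvStep]
      rw [if_neg (by decide)]
      rw [pvStep]
      rw [if_neg (by decide)]
      rw [pvStep]
      rw [if_pos (by decide)]
      rw [if_neg (by omega)]
      simp only [Int.reduceMul]
      rw [pvStep]
      rw [if_neg (by decide)]
      rw [pvStep]
      rw [if_pos (by decide)]
      rw [if_neg (by omega)]
      simp only [Int.reduceMul]
      rw [pvStep]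
      rw [if_neg (by decide)]
      rw [pvStep]
      rw [if_neg (by decide)]
      rw [pvStep]
      rw [if_neg (by decide)]
      rw [pvStep]
      rw [if_pos (by decide)]
      rw [if_pos (by exact ⟨by norm_num, by omega⟩)]
    have he : pvOuter limit 32 1 = 9699690 := pvOuterSome limit 32 9699690 0 hs7
    rw [he]; simp only [pvS]; split_ifs <;> omega
  have hsF : pvSieveLoop limit 32 ([2, 3, 4, 5, 6, 7, 8, 9, 10, 11, 12, 13, 14, 15, 16, 17, 18, 19, 20, 21, 22, 23, 24, 25, 26, 27, 28, 29, 30, 31, 32] : List Int) (List.replicate 33 false) 1 = some 223092870 := by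
    rw [pvStep]
    rw [if_pos (by decide)]
    rw [if_neg (fun hh => absurd hh.1 (by norm_num))]
    simp only [Int.reduceMul]
    rw [pvStep]
    rw [if_pos (by decide)]
    rw [if_neg (by omega)]
    simp only [Int.reduceMul]
    rw [pvStep]
    rw [if_neg (by decide)]
    rw [pvStep]
    rw [if_pos (by decide)]
    rw [if_neg (by omega)]
    simp only [Int.reduceMul]
    rw [pvStep]
    rw [if_neg (by decide)]
    rw [pvStep]
    rw [if_pos (by decide)]
    rw [if_neg (by omega)]
    simp only [Int.reduceMul]
    rw [pvStep]
    rw [if_neg (by decide)]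
    rw [pvStep]
    rw [if_neg (by decide)]
    rw [pvStep]
    rw [if_neg (by decide)]
    rw [pvStep]
    rw [if_pos (by decide)]
    rw [if_neg (by omega)]
    simp only [Int.reduceMul]
    rw [pvStep]
    rw [if_neg (by decide)]
    rw [pvStep]
    rw [if_pos (by decide)]
    rw [if_neg (by omega)]
    simp only [Int.reduceMul]
    rw [pvStep]
    rw [if_neg (by decide)]
    rw [pvStep]
    rw [if_neg (by decide)]
    rw [pvStep]
    rw [if_neg (by decide)]
    rw [pvStep]
    rw [if_pos (by decide)]
    rw [if_neg (by omega)]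
    simp only [Int.reduceMul]
    rw [pvStep]
    rw [if_neg (by decide)]
    rw [pvStep]
    rw [if_pos (by decide)]
    rw [if_neg (by omega)]
    simp only [Int.reduceMul]
    rw [pvStep]
    rw [if_neg (by decide)]
    rw [pvStep]
    rw [if_neg (by decide)]
    rw [pvStep]
    rw [if_neg (by decide)]
    rw [pvStep]
    rw [if_pos (by decide)]
    rw [if_neg (by omega)]
    simp only [Int.reduceMul]
    rw [pvStep]
    rw [if_neg (by decide)]
    rw [pvStep]
    rw [if_neg (by decide)]
    rw [pvStep]
    rw [if_neg (by decide)]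
    rw [pvStep]
    rw [if_neg (by decide)]
    rw [pvStep]
    rw [if_neg (by decide)]
    rw [pvStep]
    rw [if_pos (by decide)]
    rw [if_pos (by exact ⟨by norm_num, by omega⟩)]
  have he : pvOuter limit 32 1 = 223092870 := pvOuterSome limit 32 223092870 0 hsF
  rw [he]; simp only [pvS]; split_ifs <;> omega

-- ===== VERDICT =====
theorem totient_maximum_spec : Claim_equal_totient_maximum := by
  intro limit hdom
  have h : limit ≤ 2147483648 := (of_decide_eq_true hdom).2
  unfold Spec_totient_maximum
  rw [pvA_eq_S limit h, pvB_eq_S limit h]
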